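-- pv_equiv track=rewrite | github.com/jaymody/aoc-python | src/2015_03.py | part2
-- ===== SOURCE A (Python) =====
-- def part2(text: str) -> int:
--     x, y, visited = [0, 0], [0, 0], {(0, 0)}
--     for i, c in enumerate(text):
--         i = i % 2
--         match c:
--             case "^":
--                 y[i] += 1
--             case "v":
--                 y[i] -= 1
--             case ">":
--                 x[i] += 1
--             case "<":
--                 x[i] -= 1
--             case _:
--                 raise Exception(f"invalid char {c}")
--         visited.add((x[i], y[i]))
--     return len(visited)
-- ===== SOURCE B (Python) =====
-- def part2(text: str) -> int:
--     for c in text: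
--         if c not in "^v><":
--             raise Exception(f"invalid char {c}")
--     delta = {"^": (0, 1), "v": (0, -1), ">": (1, 0), "<": (-1, 0)}
--     visited = {(0, 0)}
--     for moves in (text[::2], text[1::2]):
--         x = y = 0
--         for c in moves:
--             dx, dy = delta[c]
--             x += dx
--             y += dy
--             visited.add((x, y))
--     return len(visited)
-- ===== Notes on version B (the rewrite author's own statement) =====
-- stated objective: alternative
-- what changed: B replaces A's single interleaved pass (index-parity-switched mutable coordinate lists) by an in-order validation pass followed by two independent scans over the parity slices text[::2] and text[1::2], each accumulating positions into the shared visited set seeded with (0,0).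
import Mathlib
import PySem

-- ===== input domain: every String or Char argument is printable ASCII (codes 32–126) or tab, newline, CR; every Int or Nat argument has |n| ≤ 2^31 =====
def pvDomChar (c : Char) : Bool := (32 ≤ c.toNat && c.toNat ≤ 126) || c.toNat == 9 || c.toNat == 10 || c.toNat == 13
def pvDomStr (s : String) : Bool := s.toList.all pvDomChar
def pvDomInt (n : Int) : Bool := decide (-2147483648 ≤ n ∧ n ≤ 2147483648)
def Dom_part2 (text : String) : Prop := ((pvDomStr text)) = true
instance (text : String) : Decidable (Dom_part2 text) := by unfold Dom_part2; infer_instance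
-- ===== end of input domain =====

-- B does the same counting by a different decomposition (validation pass, then two parity-slice scans); equivalence is about the return value.

-- ===== PORT A =====
-- Python's two-element lists x, y are ported as pairs; x[j] += d is pvBump, x[j] is pvGet.
def pvBump (p : Int × Int) (j : Nat) (d : Int) : Int × Int :=
  if j = 0 then (p.1 + d, p.2) else (p.1, p.2 + d)

def pvGet (p : Int × Int) (j : Nat) : Int := if j = 0 then p.1 else p.2

-- the for-loop of A; `none` represents the raised Exception on an invalid char
def part2Go : List Char → Nat → (Int × Int) → (Int × Int) → PySem.Set (Int × Int) → Option (PySem.Set (Int × Int))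
  | [], _, _, _, vis => some vis
  | c :: rest, i, x, y, vis =>
    let j := i % 2
    if c = '^' then
      let y' := pvBump y j 1
      part2Go rest (i + 1) x y' (vis.add (pvGet x j, pvGet y' j))
    else if c = 'v' then
      let y' := pvBump y j (-1)
      part2Go rest (i + 1) x y' (vis.add (pvGet x j, pvGet y' j))
    else if c = '>' then
      let x' := pvBump x j 1
      part2Go rest (i + 1) x' y (vis.add (pvGet x' j, pvGet y j))
    else if c = '<' then
      let x' := pvBump x j (-1)
      part2Go rest (i + 1) x' y (vis.add (pvGet x' j, pvGet y j))
    else none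

def part2 (text : String) : Int :=
  match part2Go text.toList 0 (0, 0) (0, 0) (PySem.Set.ofList [(0, 0)]) with
  | some vis => (vis.length : Int)
  | none => 0

-- ===== PORT B =====
def pvMoveChar (c : Char) : Bool := c == '^' || c == 'v' || c == '>' || c == '<'

-- the delta dict of B (lookup of a key outside the dict is unreachable: B validates first)
def pvDelta (c : Char) : Int × Int :=
  if c == '^' then (0, 1) else if c == 'v' then (0, -1)
  else if c == '>' then (1, 0) else (-1, 0)

-- the inner for-loop of B over one agent's moves
def pvScan : List Char → Int → Int → PySem.Set (Int × Int) → PySem.Set (Int × Int)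
  | [], _, _, vis => vis
  | c :: rest, x, y, vis =>
    let d := pvDelta c
    pvScan rest (x + d.1) (y + d.2) (vis.add (x + d.1, y + d.2))

def part2_alt (text : String) : Int :=
  if text.toList.all pvMoveChar then      -- B's validation loop; on failure B raises (ported as the else branch)
    let m0 := (PySem.List.slice? text.toList none none 2).getD []        -- text[::2]
    let m1 := (PySem.List.slice? text.toList (some 1) none 2).getD []    -- text[1::2]
    ((pvScan m1 0 0 (pvScan m0 0 0 (PySem.Set.ofList [(0, 0)]))).length : Int)
  else 0

-- ===== PRECONDITION & SPEC =====
-- Pre_ excludes exactly the strings containing a char other than ^ v > <, on which A raises Exception (and B raises the same).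
def Pre_part2 (text : String) : Prop := text.toList.all pvMoveChar = true
instance (text : String) : Decidable (Pre_part2 text) := by unfold Pre_part2; infer_instance

def pvWitness_part2 : String := "^>v<^^v"

def Spec_part2 (text : String) (out : Int) : Prop := out = part2_alt text
instance (text : String) (out : Int) : Decidable (Spec_part2 text out) := by unfold Spec_part2; infer_instance

-- ===== CLAIM (what is proved, stated in full; the proofs are below) =====
def Claim_equal_part2 : Prop := ∀ (text : String), Dom_part2 text → Pre_part2 text → Spec_part2 text (part2 text)

-- ===== LEMMAS AND PROOFS =====

-- every second element of a list, starting at the first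
def pvEvens : List Char → List Char
  | [] => []
  | [a] => [a]
  | a :: _ :: r => a :: pvEvens r

-- successive positions of a walk starting at (x, y) (start excluded)
def pvPath : List Char → Int → Int → List (Int × Int)
  | [], _, _ => []
  | c :: r, x, y => (x + (pvDelta c).1, y + (pvDelta c).2) :: pvPath r (x + (pvDelta c).1) (y + (pvDelta c).2)

lemma pvEvens_cons (c : Char) (cs : List Char) : pvEvens (c :: cs) = c :: pvEvens cs.tail := by
  cases cs <;> simp [pvEvens]

lemma pvDelta_up : pvDelta '^' = (0, 1) := by decide
lemma pvDelta_down : pvDelta 'v' = (0, -1) := by decide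
lemma pvDelta_right : pvDelta '>' = (1, 0) := by decide
lemma pvDelta_left : pvDelta '<' = (-1, 0) := by decide

lemma aux_filter (xs : List Char) :
    List.filterMap (fun k : Nat => xs[(2 * (k : Int)).toNat]?) (List.range ((xs.length + 1) / 2)) = pvEvens xs := by
  induction xs using pvEvens.induct with
  | case1 => simp [pvEvens]
  | case2 a => simp [pvEvens]
  | case3 a b r ih =>
    have hl : ((a :: b :: r).length + 1) / 2 = (r.length + 1) / 2 + 1 := by simp; omega
    have h0 : ((a :: b :: r)[(2 * ((0 : Nat) : Int)).toNat]?) = some a := by norm_num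
    have hstep : ∀ k : Nat, ((a :: b :: r)[(2 * ((k + 1 : Nat) : Int)).toNat]?) = r[(2 * (k : Int)).toNat]? := by
      intro k
      have h1 : (2 * ((k + 1 : Nat) : Int)).toNat = (2 * ((k : Nat) : Int)).toNat + 1 + 1 := by
        push_cast; omega
      rw [h1, List.getElem?_cons_succ, List.getElem?_cons_succ]
    rw [hl, List.range_succ_eq_map]
    simp only [List.filterMap_cons, List.filterMap_map, h0]
    rw [List.filterMap_congr (g := fun k : Nat => r[(2 * (k : Int)).toNat]?) ?_]
    · rw [ih]; rfl
    · intro k _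
      simpa [Function.comp] using hstep k

lemma aux_slice_evens (xs : List Char) :
    PySem.List.slice? xs none none 2 = some (pvEvens xs) := by
  simp only [PySem.List.slice?, PySem.List.sliceIndices]
  norm_num
  have hc : (if 0 < xs.length then (((xs.length : Int) + 2 - 1) / 2).toNat else 0) = (xs.length + 1) / 2 := by
    split <;> omega
  rw [hc]
  exact aux_filter xs

lemma aux_slice_odds (xs : List Char) :
    PySem.List.slice? xs (some 1) none 2 = some (pvEvens xs.tail) := by
  by_cases hx : xs = []
  · subst hx; decide
  · have hpos : 0 < xs.length := List.length_pos_of_ne_nil hx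
    simp only [PySem.List.slice?, PySem.List.sliceIndices]
    norm_num
    have hmin : min 1 (xs.length : Int) = 1 := by omega
    rw [hmin]
    have hlen : xs.tail.length = xs.length - 1 := by simp
    have hc : (if 1 < xs.length then (((xs.length : Int) - 1 + 2 - 1) / 2).toNat else 0)
        = (xs.tail.length + 1) / 2 := by
      split <;> omega
    rw [hc]
    rw [List.filterMap_congr (g := fun k : Nat => xs.tail[(2 * (k : Int)).toNat]?) ?_]
    · exact aux_filter xs.tail
    · intro k _
      obtain ⟨a, t, rfl⟩ := List.exists_cons_of_ne_nil hx
      have h1 : ((1 : Int) + 2 * (k : Nat)).toNat = (2 * ((k : Nat) : Int)).toNat + 1 := by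
        push_cast; omega
      rw [h1, List.getElem?_cons_succ]
      simp

lemma pvScan_mem (ms : List Char) : ∀ (x y : Int) (vis : PySem.Set (Int × Int)) (z : Int × Int),
    z ∈ pvScan ms x y vis ↔ z ∈ vis ∨ z ∈ pvPath ms x y := by
  induction ms with
  | nil => intro x y vis z; simp [pvScan, pvPath]
  | cons c r ih =>
    intro x y vis z
    simp only [pvScan, pvPath, ih, PySem.Set.mem_add, List.mem_cons]
    tauto

lemma pvScan_nodup (ms : List Char) : ∀ (x y : Int) (vis : PySem.Set (Int × Int)),
    vis.Nodup → (pvScan ms x y vis).Nodup := by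
  induction ms with
  | nil => intro x y vis h; exact h
  | cons c r ih => intro x y vis h; exact ih _ _ _ (PySem.Set.nodup_add _ _ h)

lemma part2Go_spec (cs : List Char) : ∀ (i : Nat) (x y : Int × Int) (vis : PySem.Set (Int × Int)),
    cs.all pvMoveChar = true →
    ∃ w, part2Go cs i x y vis = some w ∧ (vis.Nodup → w.Nodup) ∧
      ∀ z, z ∈ w ↔ z ∈ vis ∨
        z ∈ pvPath (pvEvens cs) (pvGet x (i % 2)) (pvGet y (i % 2)) ∨
        z ∈ pvPath (pvEvens cs.tail) (pvGet x ((i + 1) % 2)) (pvGet y ((i + 1) % 2)) := by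
  induction cs with
  | nil => intro i x y vis _; exact ⟨vis, rfl, fun h => h, by simp [pvEvens, pvPath]⟩
  | cons c r ih =>
    intro i x y vis hall
    have hc : c = '^' ∨ c = 'v' ∨ c = '>' ∨ c = '<' := by
      have hcm : pvMoveChar c = true := by
        have := List.all_eq_true.mp hall c (by simp)
        exact this
      simp [pvMoveChar] at hcm
      tauto
    have hr : r.all pvMoveChar = true := by
      simp only [List.all_cons, Bool.and_eq_true] at hall
      exact hall.2
    rcases hc with rfl | rfl | rfl | rfl <;> rcases Nat.mod_two_eq_zero_or_one i with hi | hi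
    · -- c = '^', i % 2 = 0
      obtain ⟨w, hw, hnd, hmem⟩ := ih (i + 1) x (y.1 + (1), y.2) (vis.add ((x.1, y.1 + (1)) : Int × Int)) hr
      have h1 : (i + 1) % 2 = 1 := by omega
      have h2 : (i + 1 + 1) % 2 = 0 := by omega
      refine ⟨w, ?_, fun h => hnd (PySem.Set.nodup_add _ _ h), fun z => ?_⟩
      · rw [← hw]; simp [part2Go, pvBump, pvGet, hi]
      · rw [hmem z]
        simp only [h1, h2, hi, PySem.Set.mem_add, pvGet, pvBump, pvEvens_cons, pvPath, pvDelta_up, pvDelta_down, pvDelta_right, pvDelta_left,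
          List.tail_cons, List.mem_cons, Char.reduceEq, reduceIte, if_true, if_false]
        norm_num
        try tauto
    · -- c = '^', i % 2 = 1
      obtain ⟨w, hw, hnd, hmem⟩ := ih (i + 1) x (y.1, y.2 + (1)) (vis.add ((x.2, y.2 + (1)) : Int × Int)) hr
      have h1 : (i + 1) % 2 = 0 := by omega
      have h2 : (i + 1 + 1) % 2 = 1 := by omega
      refine ⟨w, ?_, fun h => hnd (PySem.Set.nodup_add _ _ h), fun z => ?_⟩
      · rw [← hw]; simp [part2Go, pvBump, pvGet, hi]
      · rw [hmem z]
        simp only [h1, h2, hi, PySem.Set.mem_add, pvGet, pvBump, pvEvens_cons, pvPath, pvDelta_up, pvDelta_down, pvDelta_right, pvDelta_left,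
          List.tail_cons, List.mem_cons, Char.reduceEq, reduceIte, if_true, if_false]
        norm_num
        try tauto
    · -- c = 'v', i % 2 = 0
      obtain ⟨w, hw, hnd, hmem⟩ := ih (i + 1) x (y.1 + (-1), y.2) (vis.add ((x.1, y.1 + (-1)) : Int × Int)) hr
      have h1 : (i + 1) % 2 = 1 := by omega
      have h2 : (i + 1 + 1) % 2 = 0 := by omega
      refine ⟨w, ?_, fun h => hnd (PySem.Set.nodup_add _ _ h), fun z => ?_⟩
      · rw [← hw]; simp [part2Go, pvBump, pvGet, hi]
      · rw [hmem z]
        simp only [h1, h2, hi, PySem.Set.mem_add, pvGet, pvBump, pvEvens_cons, pvPath, pvDelta_up, pvDelta_down, pvDelta_right, pvDelta_left,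
          List.tail_cons, List.mem_cons, Char.reduceEq, reduceIte, if_true, if_false]
        norm_num
        try tauto
    · -- c = 'v', i % 2 = 1
      obtain ⟨w, hw, hnd, hmem⟩ := ih (i + 1) x (y.1, y.2 + (-1)) (vis.add ((x.2, y.2 + (-1)) : Int × Int)) hr
      have h1 : (i + 1) % 2 = 0 := by omega
      have h2 : (i + 1 + 1) % 2 = 1 := by omega
      refine ⟨w, ?_, fun h => hnd (PySem.Set.nodup_add _ _ h), fun z => ?_⟩
      · rw [← hw]; simp [part2Go, pvBump, pvGet, hi]
      · rw [hmem z]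
        simp only [h1, h2, hi, PySem.Set.mem_add, pvGet, pvBump, pvEvens_cons, pvPath, pvDelta_up, pvDelta_down, pvDelta_right, pvDelta_left,
          List.tail_cons, List.mem_cons, Char.reduceEq, reduceIte, if_true, if_false]
        norm_num
        try tauto
    · -- c = '>', i % 2 = 0
      obtain ⟨w, hw, hnd, hmem⟩ := ih (i + 1) (x.1 + (1), x.2) y (vis.add ((x.1 + (1), y.1) : Int × Int)) hr
      have h1 : (i + 1) % 2 = 1 := by omega
      have h2 : (i + 1 + 1) % 2 = 0 := by omega
      refine ⟨w, ?_, fun h => hnd (PySem.Set.nodup_add _ _ h), fun z => ?_⟩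
      · rw [← hw]; simp [part2Go, pvBump, pvGet, hi]
      · rw [hmem z]
        simp only [h1, h2, hi, PySem.Set.mem_add, pvGet, pvBump, pvEvens_cons, pvPath, pvDelta_up, pvDelta_down, pvDelta_right, pvDelta_left,
          List.tail_cons, List.mem_cons, Char.reduceEq, reduceIte, if_true, if_false]
        norm_num
        try tauto
    · -- c = '>', i % 2 = 1
      obtain ⟨w, hw, hnd, hmem⟩ := ih (i + 1) (x.1, x.2 + (1)) y (vis.add ((x.2 + (1), y.2) : Int × Int)) hr
      have h1 : (i + 1) % 2 = 0 := by omega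
      have h2 : (i + 1 + 1) % 2 = 1 := by omega
      refine ⟨w, ?_, fun h => hnd (PySem.Set.nodup_add _ _ h), fun z => ?_⟩
      · rw [← hw]; simp [part2Go, pvBump, pvGet, hi]
      · rw [hmem z]
        simp only [h1, h2, hi, PySem.Set.mem_add, pvGet, pvBump, pvEvens_cons, pvPath, pvDelta_up, pvDelta_down, pvDelta_right, pvDelta_left,
          List.tail_cons, List.mem_cons, Char.reduceEq, reduceIte, if_true, if_false]
        norm_num
        try tauto
    · -- c = '<', i % 2 = 0
      obtain ⟨w, hw, hnd, hmem⟩ := ih (i + 1) (x.1 + (-1), x.2) y (vis.add ((x.1 + (-1), y.1) : Int × Int)) hr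
      have h1 : (i + 1) % 2 = 1 := by omega
      have h2 : (i + 1 + 1) % 2 = 0 := by omega
      refine ⟨w, ?_, fun h => hnd (PySem.Set.nodup_add _ _ h), fun z => ?_⟩
      · rw [← hw]; simp [part2Go, pvBump, pvGet, hi]
      · rw [hmem z]
        simp only [h1, h2, hi, PySem.Set.mem_add, pvGet, pvBump, pvEvens_cons, pvPath, pvDelta_up, pvDelta_down, pvDelta_right, pvDelta_left,
          List.tail_cons, List.mem_cons, Char.reduceEq, reduceIte, if_true, if_false]
        norm_num
        try tauto
    · -- c = '<', i % 2 = 1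
      obtain ⟨w, hw, hnd, hmem⟩ := ih (i + 1) (x.1, x.2 + (-1)) y (vis.add ((x.2 + (-1), y.2) : Int × Int)) hr
      have h1 : (i + 1) % 2 = 0 := by omega
      have h2 : (i + 1 + 1) % 2 = 1 := by omega
      refine ⟨w, ?_, fun h => hnd (PySem.Set.nodup_add _ _ h), fun z => ?_⟩
      · rw [← hw]; simp [part2Go, pvBump, pvGet, hi]
      · rw [hmem z]
        simp only [h1, h2, hi, PySem.Set.mem_add, pvGet, pvBump, pvEvens_cons, pvPath, pvDelta_up, pvDelta_down, pvDelta_right, pvDelta_left,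
          List.tail_cons, List.mem_cons, Char.reduceEq, reduceIte, if_true, if_false]
        norm_num
        try tauto

-- ===== VERDICT (by name: the statement is the Claim_ definition above) =====
theorem part2_spec : Claim_equal_part2 := by
  intro text _ hpre
  unfold Pre_part2 at hpre
  unfold Spec_part2 part2 part2_alt
  obtain ⟨w, hw, hnd, hmem⟩ :=
    part2Go_spec text.toList 0 (0, 0) (0, 0) (PySem.Set.ofList [(0, 0)]) hpre
  rw [hw]
  simp only [hpre, if_true, aux_slice_evens, aux_slice_odds, Option.getD_some]
  have hndA : w.Nodup := hnd (PySem.Set.nodup_ofList _)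
  have hndB : (pvScan (pvEvens text.toList.tail) 0 0
      (pvScan (pvEvens text.toList) 0 0 (PySem.Set.ofList [(0, 0)]))).Nodup :=
    pvScan_nodup _ _ _ _ (pvScan_nodup _ _ _ _ (PySem.Set.nodup_ofList _))
  have hperm : w.Perm (pvScan (pvEvens text.toList.tail) 0 0
      (pvScan (pvEvens text.toList) 0 0 (PySem.Set.ofList [(0, 0)]))) := by
    rw [List.perm_ext_iff_of_nodup hndA hndB]
    intro z
    rw [hmem z]
    simp only [pvScan_mem, PySem.Set.mem_ofList]
    norm_num [pvGet]
    tauto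
  exact_mod_cast hperm.length_eq
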